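-- pv_equiv track=rewrite | github.com/1535109979/a_songbo | binance_client/backtest/portfilo_breakout.py | cal_max_withdrawal
-- ===== SOURCE A (Python) =====
-- def cal_max_withdrawal(account_value_list):
--     max_withdrawal = 0
--     for i, vlaue in enumerate(account_value_list):
--         if i < 2:
--             continue
--         withdrawal = max(account_value_list[:i]) - vlaue
--         if withdrawal > max_withdrawal:
--             max_withdrawal = withdrawal
--     return max_withdrawal
-- ===== SOURCE B (Python) =====
-- def cal_max_withdrawal(account_value_list):
--     # Single pass with a running prefix maximum (O(n) instead of A's O(n^2)).
--     if len(account_value_list) < 3: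
--         return 0
--     a, b = account_value_list[0], account_value_list[1]
--     run_max = a if a > b else b
--     best = 0
--     for v in account_value_list[2:]:
--         if run_max - v > best:
--             best = run_max - v
--         if v > run_max:
--             run_max = v
--     return best
-- ===== Notes on version B (the rewrite author's own statement) =====
-- stated objective: faster
-- what changed: B replaces A's per-element recomputation of max(prefix) over a slice with a single pass that maintains the running prefix maximum.
import Mathlib
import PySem

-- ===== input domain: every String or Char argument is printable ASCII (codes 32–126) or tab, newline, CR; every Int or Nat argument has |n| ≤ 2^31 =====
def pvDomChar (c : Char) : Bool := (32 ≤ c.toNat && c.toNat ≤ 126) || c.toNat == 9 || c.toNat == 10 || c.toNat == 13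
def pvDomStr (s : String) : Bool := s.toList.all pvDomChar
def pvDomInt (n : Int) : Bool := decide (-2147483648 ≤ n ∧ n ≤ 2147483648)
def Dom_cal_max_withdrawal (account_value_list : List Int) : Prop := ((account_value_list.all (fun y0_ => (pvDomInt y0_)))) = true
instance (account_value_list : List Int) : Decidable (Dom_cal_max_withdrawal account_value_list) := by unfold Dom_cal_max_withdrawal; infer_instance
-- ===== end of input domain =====

-- B replaces A's O(n^2) per-element recomputation of max(prefix) with a single O(n) pass
-- maintaining the running prefix maximum (objective: faster).

-- ===== PORT A =====
-- loop body of A (the `match none` branch is Python's ValueError on max([]); it is unreachable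
-- here since the slice is nonempty whenever i ≥ 2 — proved below, so A is total)
def calA_step (l : List Int) (max_withdrawal : Int) (iv : Int × Int) : Int :=
  if iv.1 < 2 then max_withdrawal
  else
    match PySem.List.max? (PySem.List.slice l none (some iv.1)) (fun x => x) with
    | some m =>
        let withdrawal := m - iv.2
        if withdrawal > max_withdrawal then withdrawal else max_withdrawal
    | none => max_withdrawal

def cal_max_withdrawal (account_value_list : List Int) : Int :=
  (PySem.List.enumerate account_value_list).foldl (calA_step account_value_list) 0

-- ===== PORT B =====
-- loop body of B: state = (best, run_max)
def calB_step (p : Int × Int) (v : Int) : Int × Int :=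
  (if p.2 - v > p.1 then p.2 - v else p.1,
   if v > p.2 then v else p.2)

def cal_max_withdrawal_alt (account_value_list : List Int) : Int :=
  match account_value_list with
  | a :: b :: v0 :: rest =>
      ((v0 :: rest).foldl calB_step (0, if a > b then a else b)).1
  | _ => 0

-- ===== PRECONDITION & SPEC =====
def Spec_cal_max_withdrawal (account_value_list : List Int) (out : Int) : Prop := out = cal_max_withdrawal_alt account_value_list
instance (account_value_list : List Int) (out : Int) : Decidable (Spec_cal_max_withdrawal account_value_list out) := by unfold Spec_cal_max_withdrawal; infer_instance

-- ===== CLAIM (what is proved, stated in full; the proofs are below) =====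
def Claim_equal_cal_max_withdrawal : Prop := ∀ (account_value_list : List Int), Dom_cal_max_withdrawal account_value_list → Spec_cal_max_withdrawal account_value_list (cal_max_withdrawal account_value_list)

-- ===== LEMMAS AND PROOFS =====

theorem max_id_front {x : Int} {t : List Int} :
    PySem.List.max? (x :: t) (fun y => y) = some (t.foldl max x) :=
  PySem.List.max?_id_cons x t

-- appending one element to the prefix updates the running maximum
theorem max_id_snoc {front : List Int} {rm v : Int}
    (h : PySem.List.max? front (fun y => y) = some rm) :
    PySem.List.max? (front ++ [v]) (fun y => y)
      = some (if v > rm then v else rm) := by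
  cases front with
  | nil =>
    rw [(PySem.List.max?_eq_none_iff _ _).mpr rfl] at h
    cases h
  | cons x t =>
    rw [max_id_front] at h
    have hrm : t.foldl max x = rm := by injection h
    show PySem.List.max? (x :: (t ++ [v])) (fun y => y) = _
    rw [max_id_front, List.foldl_append, hrm]
    congr 1
    simp [List.foldl]
    omega

-- main loop invariant: A's fold over the remaining enumerated suffix, with the prefix
-- `front` (length ≥ 2) already consumed, equals B's fold carrying (best, run_max)
theorem loop_eq (front rest : List Int) (mw rm : Int)
    (h2 : 2 ≤ front.length)
    (hrm : PySem.List.max? front (fun y => y) = some rm) :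
    (PySem.List.enumerate rest (front.length : Int)).foldl
        (calA_step (front ++ rest)) mw
      = (rest.foldl calB_step (mw, rm)).1 := by
  induction rest generalizing front mw rm with
  | nil => simp [PySem.List.enumerate_nil, List.foldl]
  | cons v t ih =>
    rw [PySem.List.enumerate_cons, List.foldl_cons]
    have hstep : calA_step (front ++ v :: t) mw ((front.length : Int), v)
        = (if rm - v > mw then rm - v else mw) := by
      unfold calA_step
      have hlt : ¬ ((front.length : Int) < 2) := by
        omega
      rw [if_neg hlt]
      have hslice : PySem.List.slice (front ++ v :: t) none (some (front.length : Int))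
          = front := by
        rw [PySem.List.slice_to_natCast]
        simp
      rw [hslice, hrm]
    rw [hstep]
    have hfront' : front ++ v :: t = (front ++ [v]) ++ t := by simp
    have hlen : (front.length : Int) + 1 = ((front ++ [v]).length : Int) := by
      simp
    rw [hlen, hfront',
      ih (front ++ [v]) (if rm - v > mw then rm - v else mw) (if v > rm then v else rm)
        (by simp; omega) (max_id_snoc hrm)]
    rfl

-- ===== VERDICT (by name: the statement is the Claim_ definition above) =====
theorem cal_max_withdrawal_spec : Claim_equal_cal_max_withdrawal := by
  intro l _
  unfold Spec_cal_max_withdrawal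
  match l with
  | [] => rfl
  | [a] => rfl
  | [a, b] => rfl
  | a :: b :: v0 :: rest =>
    show (PySem.List.enumerate (a :: b :: v0 :: rest)).foldl
        (calA_step (a :: b :: v0 :: rest)) 0 = _
    rw [PySem.List.enumerate_cons, PySem.List.enumerate_cons,
      List.foldl_cons, List.foldl_cons]
    have h1 : calA_step (a :: b :: v0 :: rest) 0 (0, a) = 0 := by
      unfold calA_step; norm_num
    have h2 : calA_step (a :: b :: v0 :: rest) 0 (0 + 1, b) = 0 := by
      unfold calA_step; norm_num
    rw [h1, h2]
    have hmax : PySem.List.max? [a, b] (fun y => y)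
        = some (if a > b then a else b) := by
      rw [max_id_front]
      congr 1
      simp [List.foldl]
      omega
    have := loop_eq [a, b] (v0 :: rest) 0 (if a > b then a else b) (by simp) hmax
    simpa using this
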